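-- pv_equiv track=rewrite | github.com/NikunjS91/resumeforge | backend/modules/export/latex_filler.py | build_education_block
-- ===== SOURCE A (Python) =====
-- LATEX_ESCAPE_MAP = {
--     '&':  r'\&',
--     '%':  r'\%',
--     '$':  r'\$',
--     '#':  r'\#',
--     '_':  r'\_',
--     '{':  r'\{',
--     '}':  r'\}',
--     '~':  r'\textasciitilde{}',
--     '^':  r'\textasciicircum{}',
--     '\\': r'\textbackslash{}',
-- }
--
-- def escape(text: str) -> str:
--     """Escape all LaTeX special characters in user content."""
--     if not text:
--         return ""
--     # Process in order to avoid double-escaping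
--     result = ""
--     for char in str(text):
--         result += LATEX_ESCAPE_MAP.get(char, char)
--     return result
--
-- def build_education_block(content: str) -> str:
--     """Convert education section text to LaTeX."""
--     lines = [l.strip() for l in content.strip().split('\n') if l.strip()]
--     blocks = []
--     current = []
--
--     for line in lines:
--         if any(kw in line.lower() for kw in ['university', 'college', 'institute', 'school']):
--             if current:
--                 blocks.append('\n'.join(current))
--             current = [line]
--         else:
--             current.append(line)
--     if current:
--         blocks.append('\n'.join(current))
--
--     latex_blocks = []
--     for block in blocks:
--         block_lines = [l.strip() for l in block.split('\n') if l.strip()]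
--         if not block_lines:
--             continue
--         latex = escape(block_lines[0])  # University name + location
--         for bl in block_lines[1:]:
--             latex += f'\\\\\n{escape(bl)}'
--         latex_blocks.append(latex)
--
--     return '\n\\vspace{2pt}\n'.join(latex_blocks)
-- ===== SOURCE B (Python) =====
-- LATEX_ESCAPE_MAP = {
--     '&':  r'\&',
--     '%':  r'\%',
--     '$':  r'\$',
--     '#':  r'\#',
--     '_':  r'\_',
--     '{':  r'\{',
--     '}':  r'\}',
--     '~':  r'\textasciitilde{}',
--     '^':  r'\textasciicircum{}',
--     '\\': r'\textbackslash{}',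
-- }
--
-- def _esc(text):
--     return ''.join(LATEX_ESCAPE_MAP.get(c, c) for c in text)
--
-- def _is_campus(line):
--     return any(kw in line.lower() for kw in ['university', 'college', 'institute', 'school'])
--
-- def build_education_block(content: str) -> str:
--     lines = [l.strip() for l in content.strip().split('\n') if l.strip()]
--     # One right-to-left pass: a line joins the group below it unless that group
--     # already starts with a campus line; no 'current' buffer, no join/re-split.
--     groups = []
--     for line in reversed(lines):
--         if groups and not _is_campus(groups[0][0]):
--             groups[0] = [line] + groups[0]
--         else:
--             groups = [[line]] + groups
--     return '\n\\vspace{2pt}\n'.join('\\\\\n'.join(_esc(l) for l in g) for g in groups)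
-- ===== Notes on version B (the rewrite author's own statement) =====
-- stated objective: simpler
-- what changed: B replaces A's stateful current-buffer/flush grouping and its join-then-resplit-and-restrip round trip by one reversed pass that builds the group lists directly (a line joins the group below it unless that group already starts with a campus line) and maps each group straight to its LaTeX string.
import Mathlib
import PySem

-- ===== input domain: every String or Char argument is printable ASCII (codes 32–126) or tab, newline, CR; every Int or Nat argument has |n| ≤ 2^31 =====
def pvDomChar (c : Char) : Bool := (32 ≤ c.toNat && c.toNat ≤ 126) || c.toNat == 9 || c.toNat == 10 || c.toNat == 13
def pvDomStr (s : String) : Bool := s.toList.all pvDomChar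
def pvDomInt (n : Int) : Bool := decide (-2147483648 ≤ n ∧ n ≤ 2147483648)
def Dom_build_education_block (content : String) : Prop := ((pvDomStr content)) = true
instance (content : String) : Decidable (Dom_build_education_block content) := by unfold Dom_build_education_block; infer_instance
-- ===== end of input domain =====

-- B replaces A's stateful current/flush grouping plus join-then-resplit round trip by a
-- single reversed pass building the group lists directly (objective: simpler).

-- ===== PORT A =====
-- module constant LATEX_ESCAPE_MAP (keys are the single characters)
def pvLatexEscapeMap : PySem.Dict Char (List Char) := PySem.Dict.ofList
  [('&', "\\&".toList), ('%', "\\%".toList), ('$', "\\$".toList), ('#', "\\#".toList),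
   ('_', "\\_".toList), ('{', "\\{".toList), ('}', "\\}".toList),
   ('~', "\\textasciitilde{}".toList), ('^', "\\textasciicircum{}".toList),
   ('\\', "\\textbackslash{}".toList)]

-- helper escape(text) of A: '' on empty, else left fold accumulating result += map.get(char, char)
def pvEscapeA (text : List Char) : List Char :=
  if text = [] then []
  else text.foldl (fun r c => r ++ PySem.Dict.getD pvLatexEscapeMap c [c]) []

-- any(kw in line.lower() for kw in [...]) — identical in A and in Source B's _is_campus
def pvCampus (line : List Char) : Bool :=
  ["university".toList, "college".toList, "institute".toList, "school".toList].any
    (fun kw => PySem.Chars.isIn kw (PySem.Chars.lower line))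

-- [l.strip() for l in content.strip().split('\n') if l.strip()] — identical first line of A and of Source B
def pvLinesOf (content : List Char) : List (List Char) :=
  ((PySem.Chars.splitOn (PySem.Chars.strip content) ['\n']).map PySem.Chars.strip).filter
    (fun l => l ≠ [])

def build_education_block (content : String) : String :=
  let lines := pvLinesOf content.toList
  let st := lines.foldl
    (fun (st : List (List Char) × List (List Char)) line =>
      if pvCampus line then
        ((if st.2 = [] then st.1 else st.1 ++ [PySem.Chars.join ['\n'] st.2]), [line])
      else (st.1, st.2 ++ [line]))
    ([], [])
  let blocks := if st.2 = [] then st.1 else st.1 ++ [PySem.Chars.join ['\n'] st.2]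
  let latex_blocks := blocks.foldl
    (fun acc block =>
      let block_lines :=
        ((PySem.Chars.splitOn block ['\n']).map PySem.Chars.strip).filter (fun l => l ≠ [])
      match block_lines with
      | [] => acc
      | b0 :: rest =>
          acc ++ [rest.foldl (fun latex bl => latex ++ ('\\' :: '\\' :: '\n' :: pvEscapeA bl))
                    (pvEscapeA b0)])
    []
  String.ofList (PySem.Chars.join "\n\\vspace{2pt}\n".toList latex_blocks)

-- ===== PORT B =====
-- Source B's _esc: ''.join(LATEX_ESCAPE_MAP.get(c, c) for c in text)
def pvEscB (text : List Char) : List Char :=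
  text.flatMap (fun c => PySem.Dict.getD pvLatexEscapeMap c [c])

def build_education_block_alt (content : String) : String :=
  let lines := pvLinesOf content.toList
  -- for line in reversed(lines): prepend to groups[0] unless it starts with a campus line
  -- (groups[0][0]: every group is nonempty by construction, headD [] is never the default)
  let groups := lines.foldr
    (fun line groups =>
      match groups with
      | [] => [[line]]
      | g :: gs => if pvCampus (g.headD []) then [line] :: g :: gs else (line :: g) :: gs)
    []
  String.ofList (PySem.Chars.join "\n\\vspace{2pt}\n".toList
    (groups.map (fun g => PySem.Chars.join ('\\' :: '\\' :: '\n' :: []) (g.map pvEscB))))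

-- ===== PRECONDITION & SPEC =====
def Spec_build_education_block (content : String) (out : String) : Prop :=
  out = build_education_block_alt content
instance (content : String) (out : String) : Decidable (Spec_build_education_block content out) := by
  unfold Spec_build_education_block; infer_instance

-- ===== CLAIM (what is proved, stated in full; the proofs are below) =====
def Claim_equal_build_education_block : Prop :=
  ∀ (content : String), Dom_build_education_block content →
    Spec_build_education_block content (build_education_block content)

-- ===== LEMMAS AND PROOFS =====

-- escape: A's foldl-append equals Source B's flatMap
theorem pvEsc_eq (text : List Char) : pvEscapeA text = pvEscB text := by
  unfold pvEscapeA pvEscB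
  split
  · simp [*]
  · simpa using
      PySem.List.foldl_append_eq_flatMap (fun c => PySem.Dict.getD pvLatexEscapeMap c [c]) text []

-- clean recursive split on '\n' characterizing PySem.Chars.splitOn s ['\n']
def splitNl : List Char → List (List Char)
  | [] => [[]]
  | c :: r =>
      if c = '\n' then [] :: splitNl r
      else match splitNl r with
           | [] => [[c]]
           | h :: t => (c :: h) :: t

theorem splitNl_ne_nil (s : List Char) : splitNl s ≠ [] := by
  induction s with
  | nil => simp [splitNl]
  | cons c r ih =>
    simp only [splitNl]
    split
    · simp
    · split <;> simp_all

theorem go_nl (fuel : Nat) : ∀ (l cur : List Char) (acc : List (List Char)),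
    l.length < fuel →
    PySem.Chars.splitOn.go ['\n'] fuel l cur acc =
      acc.reverse ++ (match splitNl l with
        | [] => []
        | h :: t => (cur.reverse ++ h) :: t) := by
  induction fuel with
  | zero => intro l cur acc h; omega
  | succ n ih =>
    intro l cur acc h
    cases l with
    | nil => simp [PySem.Chars.splitOn.go, splitNl]
    | cons c rest =>
      rw [PySem.Chars.splitOn.go]
      by_cases hc : c = '\n'
      · subst hc
        have hp : List.isPrefixOf ['\n'] ('\n' :: rest) = true := by simp [List.isPrefixOf]
        simp only [hp, if_pos]
        rw [ih]
        · rcases hsp : splitNl rest with _ | ⟨h1, t1⟩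
          · simp [splitNl, hsp]
          · simp [splitNl, hsp]
        · simp at h; simpa using h
      · have hp : List.isPrefixOf ['\n'] (c :: rest) = false := by
          simp [List.isPrefixOf]; exact fun hh => absurd hh.symm hc
        simp only [hp, Bool.false_eq_true, if_false]
        rw [ih]
        · rcases hsp : splitNl rest with _ | ⟨h1, t1⟩
          · exact absurd hsp (splitNl_ne_nil rest)
          · simp [splitNl, hsp, hc]
        · simp at h; omega

theorem splitOn_nl_eq (s : List Char) : PySem.Chars.splitOn s ['\n'] = splitNl s := by
  unfold PySem.Chars.splitOn
  rw [go_nl (s.length + 1) s [] [] (by omega)]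
  rcases hsp : splitNl s with _ | ⟨h1, t1⟩
  · exact absurd hsp (splitNl_ne_nil s)
  · simp

theorem splitNl_no_nl (s : List Char) : ∀ p ∈ splitNl s, '\n' ∉ p := by
  induction s with
  | nil => simp [splitNl]
  | cons c r ih =>
    simp only [splitNl]
    split
    · simpa using ih
    · rcases hsp : splitNl r with _ | ⟨h1, t1⟩
      · exact absurd hsp (splitNl_ne_nil r)
      · intro p hp
        rcases List.mem_cons.mp hp with rfl | hmem
        · have hh1 := ih h1 (by rw [hsp]; simp)
          simp only [List.mem_cons, not_or]
          exact ⟨fun hh => ‹¬c = '\n'› hh.symm, hh1⟩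
        · exact ih p (by rw [hsp]; simp [hmem])

theorem splitNl_free (p : List Char) (h : '\n' ∉ p) : splitNl p = [p] := by
  induction p with
  | nil => simp [splitNl]
  | cons c r ih =>
    simp only [List.mem_cons, not_or] at h
    simp only [splitNl, ih h.2]
    split
    · exact absurd (‹c = '\n'›).symm h.1
    · rfl

theorem splitNl_append (a rest : List Char) (ha : '\n' ∉ a) :
    splitNl (a ++ '\n' :: rest) = a :: splitNl rest := by
  induction a with
  | nil => simp [splitNl]
  | cons c t ih =>
    simp only [List.mem_cons, not_or] at ha
    simp only [List.cons_append, splitNl, ih ha.2]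
    split
    · exact absurd (‹c = '\n'›).symm ha.1
    · rfl

theorem splitNl_join (g : List (List Char)) (hne : g ≠ []) (h : ∀ l ∈ g, '\n' ∉ l) :
    splitNl (PySem.Chars.join ['\n'] g) = g := by
  induction g with
  | nil => exact absurd rfl hne
  | cons a t ih =>
    cases t with
    | nil => rw [PySem.Chars.join_singleton]; exact splitNl_free a (h a (by simp))
    | cons b t' =>
      rw [PySem.Chars.join_cons_cons]
      have : a ++ ['\n'] ++ PySem.Chars.join ['\n'] (b :: t') =
          a ++ '\n' :: PySem.Chars.join ['\n'] (b :: t') := by simp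
      rw [this, splitNl_append a _ (h a (by simp)),
        ih (by simp) (fun l hl => h l (by simp [hl]))]

theorem head?_getElem0 {α : Type} (u : List α) (hl : 0 < u.length) :
    u.head? = some u[0] := by
  cases u with
  | nil => simp at hl
  | cons a b => simp

theorem prefix_head {α : Type} {l₁ l₂ : List α} (h : l₁ <+: l₂) (hne : l₁ ≠ []) :
    l₁.head? = l₂.head? := by
  obtain ⟨r, rfl⟩ := h; cases l₁ <;> simp_all

theorem strip_idem (s : List Char) :
    PySem.Chars.strip (PySem.Chars.strip s) = PySem.Chars.strip s := by
  unfold PySem.Chars.strip PySem.Chars.rstrip PySem.Chars.lstrip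
  have key : ∀ (t : List Char), (∀ x, t.head? = some x → PySem.Chars.isspace x = false) →
      List.dropWhile PySem.Chars.isspace ((List.dropWhile PySem.Chars.isspace t.reverse).reverse) =
      (List.dropWhile PySem.Chars.isspace t.reverse).reverse := by
    intro t hh
    rw [List.dropWhile_eq_self_iff]
    intro hl hpx
    have hne : (List.dropWhile PySem.Chars.isspace t.reverse).reverse ≠ [] := by
      intro h; rw [h] at hl; simp at hl
    have hpref : (List.dropWhile PySem.Chars.isspace t.reverse).reverse <+: t := by
      have h := List.IsSuffix.reverse
        (List.dropWhile_suffix (l := t.reverse) PySem.Chars.isspace)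
      rwa [List.reverse_reverse] at h
    have hh0 := head?_getElem0 _ hl
    have := hh _ (by rw [← prefix_head hpref hne]; exact hh0)
    simp_all
  have h1 : ∀ x, (List.dropWhile PySem.Chars.isspace s).head? = some x →
      PySem.Chars.isspace x = false := by
    intro x hx
    have h0 := List.head?_dropWhile_not PySem.Chars.isspace s
    rw [hx] at h0
    exact h0
  rw [key (List.dropWhile PySem.Chars.isspace s) h1, List.reverse_reverse,
    List.dropWhile_idempotent]

theorem mem_strip {c : Char} {s : List Char} (h : c ∈ PySem.Chars.strip s) : c ∈ s := by
  unfold PySem.Chars.strip PySem.Chars.rstrip PySem.Chars.lstrip at h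
  simp only [List.mem_reverse] at h
  have h1 := (List.dropWhile_sublist _).mem h
  simp only [List.mem_reverse] at h1
  exact (List.dropWhile_sublist _).mem h1

-- "good" line: stripped, nonempty, newline-free
def pvGood (l : List Char) : Prop :=
  PySem.Chars.strip l = l ∧ l ≠ [] ∧ '\n' ∉ l

theorem pvLinesOf_good (cs : List Char) : ∀ l ∈ pvLinesOf cs, pvGood l := by
  intro l hl
  unfold pvLinesOf at hl
  rw [splitOn_nl_eq] at hl
  simp only [List.mem_filter, List.mem_map, decide_eq_true_eq] at hl
  obtain ⟨⟨p, hp, rfl⟩, hne⟩ := hl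
  refine ⟨strip_idem p, hne, fun hc => ?_⟩
  exact splitNl_no_nl _ p hp (mem_strip hc)

-- clean recursion for A's grouping loop
def pvGr (cur : List (List Char)) : List (List Char) → List (List (List Char))
  | [] => if cur = [] then [] else [cur]
  | l :: ls =>
      if pvCampus l then (if cur = [] then [] else [cur]) ++ pvGr [l] ls
      else pvGr (cur ++ [l]) ls

-- A's fold + final flush equal pvGr, mapped through join
theorem pvFold_eq_gr (ls : List (List Char)) : ∀ (blocks cur : List (List Char)),
    (if (ls.foldl
        (fun (st : List (List Char) × List (List Char)) line =>
          if pvCampus line then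
            ((if st.2 = [] then st.1 else st.1 ++ [PySem.Chars.join ['\n'] st.2]), [line])
          else (st.1, st.2 ++ [line]))
        (blocks, cur)).2 = []
     then (ls.foldl
        (fun (st : List (List Char) × List (List Char)) line =>
          if pvCampus line then
            ((if st.2 = [] then st.1 else st.1 ++ [PySem.Chars.join ['\n'] st.2]), [line])
          else (st.1, st.2 ++ [line]))
        (blocks, cur)).1
     else (ls.foldl
        (fun (st : List (List Char) × List (List Char)) line =>
          if pvCampus line then
            ((if st.2 = [] then st.1 else st.1 ++ [PySem.Chars.join ['\n'] st.2]), [line])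
          else (st.1, st.2 ++ [line]))
        (blocks, cur)).1 ++ [PySem.Chars.join ['\n'] (ls.foldl
        (fun (st : List (List Char) × List (List Char)) line =>
          if pvCampus line then
            ((if st.2 = [] then st.1 else st.1 ++ [PySem.Chars.join ['\n'] st.2]), [line])
          else (st.1, st.2 ++ [line]))
        (blocks, cur)).2]) =
    blocks ++ (pvGr cur ls).map (PySem.Chars.join ['\n']) := by
  induction ls with
  | nil =>
    intro blocks cur
    simp only [List.foldl_nil, pvGr]
    split_ifs <;> simp_all
  | cons l ls ih =>
    intro blocks cur
    simp only [List.foldl_cons, pvGr]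
    by_cases hc : pvCampus l
    · simp only [hc, if_true]
      rw [ih]
      split_ifs <;> simp
    · simp only [hc, Bool.false_eq_true, if_false]
      rw [ih]

theorem pvGr_groups_good (ls : List (List Char)) : ∀ (cur : List (List Char)),
    (∀ l ∈ cur, pvGood l) → (∀ l ∈ ls, pvGood l) →
    ∀ g ∈ pvGr cur ls, g ≠ [] ∧ ∀ l ∈ g, pvGood l := by
  induction ls with
  | nil =>
    intro cur hc _ g hg
    unfold pvGr at hg
    split at hg
    · simp at hg
    · rcases List.mem_singleton.mp hg with rfl
      exact ⟨by assumption, hc⟩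
  | cons l ls ih =>
    intro cur hc hl g hg
    have hlg : pvGood l := hl l (by simp)
    have hls : ∀ x ∈ ls, pvGood x := fun x hx => hl x (by simp [hx])
    unfold pvGr at hg
    split at hg
    · rcases List.mem_append.mp hg with h1 | h2
      · split at h1
        · simp at h1
        · rcases List.mem_singleton.mp h1 with rfl
          exact ⟨by assumption, hc⟩
      · refine ih [l] ?_ hls g h2
        intro x hx
        rw [List.mem_singleton.mp hx]
        exact hlg
    · refine ih (cur ++ [l]) ?_ hls g hg
      intro x hx
      rcases List.mem_append.mp hx with h1 | h1
      · exact hc x h1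
      · rw [List.mem_singleton.mp h1]
        exact hlg

-- re-split of a joined good group is the group itself
theorem resplit_join (g : List (List Char)) (hne : g ≠ []) (h : ∀ l ∈ g, pvGood l) :
    ((PySem.Chars.splitOn (PySem.Chars.join ['\n'] g) ['\n']).map PySem.Chars.strip).filter
      (fun l => l ≠ []) = g := by
  rw [splitOn_nl_eq, splitNl_join g hne (fun l hl => (h l hl).2.2)]
  rw [List.map_congr_left (fun l hl => (h l hl).1)]
  simp only [List.map_id', List.filter_eq_self]
  intro a ha
  simpa using (h a ha).2.1

-- A's inner latex foldl is a join
theorem join_cons_flatMap (sep : List Char) (t : List (List Char)) : ∀ (h : List Char),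
    PySem.Chars.join sep (h :: t) = h ++ t.flatMap (fun x => sep ++ x) := by
  induction t with
  | nil => intro h; rw [PySem.Chars.join_singleton]; simp
  | cons b t' ih =>
    intro h
    rw [PySem.Chars.join_cons_cons, ih b]
    simp [List.append_assoc]

theorem latex_foldl_join (b0 : List Char) (rest : List (List Char)) :
    rest.foldl (fun latex bl => latex ++ ('\\' :: '\\' :: '\n' :: pvEscapeA bl)) (pvEscapeA b0) =
    PySem.Chars.join ('\\' :: '\\' :: '\n' :: []) ((b0 :: rest).map pvEscB) := by
  have h1 := PySem.List.foldl_append_eq_flatMap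
    (fun bl => '\\' :: '\\' :: '\n' :: pvEscapeA bl) rest (pvEscapeA b0)
  rw [List.map_cons, join_cons_flatMap, List.flatMap_map]
  rw [show (fun latex bl => latex ++ ('\\' :: '\\' :: '\n' :: pvEscapeA bl)) =
      (fun acc bl => acc ++ ('\\' :: '\\' :: '\n' :: pvEscapeA bl)) from rfl, h1]
  simp [pvEsc_eq]

theorem latex_fold (gl : List (List (List Char))) : ∀ (acc : List (List Char)),
    (∀ g ∈ gl, g ≠ [] ∧ ∀ l ∈ g, pvGood l) →
    (gl.map (PySem.Chars.join ['\n'])).foldl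
      (fun acc block =>
        match ((PySem.Chars.splitOn block ['\n']).map PySem.Chars.strip).filter
            (fun l => l ≠ []) with
        | [] => acc
        | b0 :: rest =>
            acc ++ [rest.foldl (fun latex bl => latex ++ ('\\' :: '\\' :: '\n' :: pvEscapeA bl))
                      (pvEscapeA b0)]) acc
    = acc ++ gl.map (fun g => PySem.Chars.join ('\\' :: '\\' :: '\n' :: []) (g.map pvEscB)) := by
  induction gl with
  | nil => intro acc _; simp
  | cons g gs ih =>
    intro acc hg
    obtain ⟨hne, hgood⟩ := hg g (by simp)
    simp only [List.map_cons, List.foldl_cons]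
    rw [ih _ (fun x hx => hg x (by simp [hx]))]
    rcases g with _ | ⟨b0, rest⟩
    · exact absurd rfl hne
    · rw [show (((PySem.Chars.splitOn (PySem.Chars.join ['\n'] (b0 :: rest)) ['\n']).map
          PySem.Chars.strip).filter (fun l => l ≠ [])) = b0 :: rest from
          resplit_join _ hne hgood]
      dsimp only
      rw [latex_foldl_join]
      simp [List.append_assoc]

-- B's foldr grouping
def pvRecB (ls : List (List Char)) : List (List (List Char)) :=
  ls.foldr
    (fun line groups =>
      match groups with
      | [] => [[line]]
      | g :: gs => if pvCampus (g.headD []) then [line] :: g :: gs else (line :: g) :: gs)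
    []

theorem recB_cons (l : List Char) (ls : List (List Char)) :
    pvRecB (l :: ls) =
      (match pvRecB ls with
        | [] => [[l]]
        | g :: gs => if pvCampus (g.headD []) then [l] :: g :: gs else (l :: g) :: gs) := rfl

theorem gr_recB (ls : List (List Char)) : ∀ (cur : List (List Char)), cur ≠ [] →
    pvGr cur ls =
      (match pvRecB ls with
        | [] => [cur]
        | g :: gs => if pvCampus (g.headD []) then cur :: g :: gs else (cur ++ g) :: gs) := by
  induction ls with
  | nil => intro cur h; simp [pvGr, pvRecB, h]
  | cons l ls ih =>
    intro cur h
    simp only [pvGr]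
    by_cases hc : pvCampus l
    · simp only [hc, if_true]
      rw [ih [l] (by simp), recB_cons]
      rcases hr : pvRecB ls with _ | ⟨g, gs⟩
      · simp [hc, h]
      · by_cases hg : pvCampus (g.headD []) <;>
          (simp only [List.headD_eq_head?_getD] at hg; simp [hg, hc, h])
    · simp only [hc, Bool.false_eq_true, if_false]
      rw [ih (cur ++ [l]) (by simp), recB_cons]
      rcases hr : pvRecB ls with _ | ⟨g, gs⟩
      · simp [hc]
      · by_cases hg : pvCampus (g.headD []) <;>
          (simp only [List.headD_eq_head?_getD] at hg; simp [hg, hc])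

theorem pvGr_eq_recB (ls : List (List Char)) : pvGr [] ls = pvRecB ls := by
  cases ls with
  | nil => rfl
  | cons l ls =>
    have h0 : pvGr [] (l :: ls) = pvGr [l] ls := by
      simp only [pvGr]
      split_ifs <;> simp
    rw [h0, gr_recB ls [l] (by simp), recB_cons]
    rcases hr : pvRecB ls with _ | ⟨g, gs⟩
    · rfl
    · by_cases hg : pvCampus (g.headD []) <;>
        (simp only [List.headD_eq_head?_getD] at hg; simp [hg])

theorem build_education_block_spec : Claim_equal_build_education_block := by
  intro content _
  unfold Spec_build_education_block build_education_block build_education_block_alt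
  have hgood := pvLinesOf_good content.toList
  dsimp only
  rw [pvFold_eq_gr, List.nil_append, latex_fold _ [] (pvGr_groups_good _ [] (by simp) hgood),
    pvGr_eq_recB]
  simp [pvRecB]
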